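-- pv_equiv track=rewrite | github.com/tkddnjs-dlqslek/k-apt-alert | proxy/main.py | _dedup_announcements
-- ===== SOURCE A (Python) =====
-- def _dedup_announcements(announcements: list) -> list:
--     """ID 기준 1차 + name+region+district 기준 2차 중복 제거.
--     서브타입별로 같은 단지가 중복 등록되는 경우 (예: 공공지원민간임대 AP1BL/AP2BL) 제거.
--     """
--     seen_ids = set()
--     seen_names = set()
--     unique = []
--     for ann in announcements:
--         ann_id = ann.get("id")
--         if ann_id in seen_ids:
--             continue
--         seen_ids.add(ann_id)
--
--         name_key = (
--             ann.get("name", "").split("(")[0].strip(),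
--             ann.get("region", ""),
--             ann.get("district", ""),
--         )
--         if name_key[0] and name_key in seen_names:
--             continue
--         seen_names.add(name_key)
--
--         unique.append(ann)
--     return unique
-- ===== SOURCE B (Python) =====
-- def _dedup_announcements(announcements: list) -> list:
--     """Two-pass dedup: first drop id-duplicates, then drop name/region/district duplicates."""
--     seen_ids = set()
--     by_id = []
--     for ann in announcements:
--         ann_id = ann.get("id")
--         if ann_id not in seen_ids:
--             seen_ids.add(ann_id)
--             by_id.append(ann)
--
--     seen_names = set()
--     unique = []
--     for ann in by_id:
--         name_key = (
--             ann.get("name", "").split("(")[0].strip(),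
--             ann.get("region", ""),
--             ann.get("district", ""),
--         )
--         if name_key[0] and name_key in seen_names:
--             continue
--         seen_names.add(name_key)
--         unique.append(ann)
--     return unique
-- ===== Notes on version B (the rewrite author's own statement) =====
-- stated objective: simpler
-- what changed: Replaced the single loop that interleaves two dedup criteria with two independent sequential passes: one pass deduplicating by id, then a second pass over the id-deduped list deduplicating by name/region/district.
import Mathlib
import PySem

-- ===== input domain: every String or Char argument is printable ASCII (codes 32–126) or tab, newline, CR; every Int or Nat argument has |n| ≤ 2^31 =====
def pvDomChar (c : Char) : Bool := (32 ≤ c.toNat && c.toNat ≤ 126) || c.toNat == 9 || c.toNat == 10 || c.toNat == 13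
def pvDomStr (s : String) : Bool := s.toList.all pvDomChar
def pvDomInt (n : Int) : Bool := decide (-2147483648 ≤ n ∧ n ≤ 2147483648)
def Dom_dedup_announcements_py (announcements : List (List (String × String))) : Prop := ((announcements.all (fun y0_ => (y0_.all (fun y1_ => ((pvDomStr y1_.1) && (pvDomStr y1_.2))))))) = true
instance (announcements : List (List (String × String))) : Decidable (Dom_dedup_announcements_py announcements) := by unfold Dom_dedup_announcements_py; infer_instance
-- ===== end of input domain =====

-- B replaces A's single loop interleaving two dedup criteria with two independent
-- sequential passes (id-dedup, then name/region/district-dedup); simpler decomposition,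
-- same return value.

-- name_key computation shared verbatim by both Pythons
def pvNameKey (ann : List (String × String)) : String × String × String :=
  (PySem.Str.strip (((PySem.Str.split? (PySem.Dict.getD (PySem.Dict.mk ann) "name" "") "(").getD []).headD ""),
   PySem.Dict.getD (PySem.Dict.mk ann) "region" "",
   PySem.Dict.getD (PySem.Dict.mk ann) "district" "")

-- ===== PORT A =====
def dedupA_loop (anns : List (List (String × String)))
    (seenIds : PySem.Set (Option String))
    (seenNames : PySem.Set (String × String × String))
    (unique : List (List (String × String))) : List (List (String × String)) :=
  match anns with
  | [] => unique
  | ann :: rest =>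
    let annId := PySem.Dict.get? (PySem.Dict.mk ann) "id"
    if PySem.Set.contains seenIds annId then
      dedupA_loop rest seenIds seenNames unique
    else
      let seenIds' := PySem.Set.add seenIds annId
      let k := pvNameKey ann
      if (k.1 != "") && PySem.Set.contains seenNames k then
        dedupA_loop rest seenIds' seenNames unique
      else
        dedupA_loop rest seenIds' (PySem.Set.add seenNames k) (unique ++ [ann])

def dedup_announcements_py (announcements : List (List (String × String))) : List (List (String × String)) :=
  dedupA_loop announcements PySem.Set.empty PySem.Set.empty []

-- ===== PORT B =====
def dedupB_pass1 (anns : List (List (String × String)))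
    (seenIds : PySem.Set (Option String))
    (byId : List (List (String × String))) : List (List (String × String)) :=
  match anns with
  | [] => byId
  | ann :: rest =>
    let annId := PySem.Dict.get? (PySem.Dict.mk ann) "id"
    if PySem.Set.contains seenIds annId then
      dedupB_pass1 rest seenIds byId
    else
      dedupB_pass1 rest (PySem.Set.add seenIds annId) (byId ++ [ann])

def dedupB_pass2 (anns : List (List (String × String)))
    (seenNames : PySem.Set (String × String × String))
    (unique : List (List (String × String))) : List (List (String × String)) :=
  match anns with
  | [] => unique
  | ann :: rest =>
    let k := pvNameKey ann
    if (k.1 != "") && PySem.Set.contains seenNames k then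
      dedupB_pass2 rest seenNames unique
    else
      dedupB_pass2 rest (PySem.Set.add seenNames k) (unique ++ [ann])

def dedup_announcements_py_alt (announcements : List (List (String × String))) : List (List (String × String)) :=
  dedupB_pass2 (dedupB_pass1 announcements PySem.Set.empty []) PySem.Set.empty []

-- ===== PRECONDITION & SPEC =====
def Spec_dedup_announcements_py (announcements : List (List (String × String))) (out : List (List (String × String))) : Prop := out = dedup_announcements_py_alt announcements
instance (announcements : List (List (String × String))) (out : List (List (String × String))) : Decidable (Spec_dedup_announcements_py announcements out) := by unfold Spec_dedup_announcements_py; infer_instance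

-- ===== CLAIM (what is proved, stated in full; the proofs are below) =====
def Claim_equal_dedup_announcements_py : Prop := ∀ (announcements : List (List (String × String))), Dom_dedup_announcements_py announcements → Spec_dedup_announcements_py announcements (dedup_announcements_py announcements)

-- ===== LEMMAS AND PROOFS =====

-- pass1's accumulator only prepends already-collected items
theorem dedupB_pass1_acc (anns : List (List (String × String)))
    (si : PySem.Set (Option String)) (acc : List (List (String × String))) :
    dedupB_pass1 anns si acc = acc ++ dedupB_pass1 anns si [] := by
  induction anns generalizing si acc with
  | nil => simp [dedupB_pass1]
  | cons a rest ih =>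
    simp only [dedupB_pass1]
    split
    · exact ih si acc
    · rw [ih _ (acc ++ [a]), ih _ ([] ++ [a])]; simp

-- interleaved single pass = pass2 after pass1
theorem dedup_main (anns : List (List (String × String)))
    (si : PySem.Set (Option String)) (sn : PySem.Set (String × String × String))
    (u : List (List (String × String))) :
    dedupA_loop anns si sn u = dedupB_pass2 (dedupB_pass1 anns si []) sn u := by
  induction anns generalizing si sn u with
  | nil => simp [dedupA_loop, dedupB_pass1, dedupB_pass2]
  | cons a rest ih =>
    simp only [dedupA_loop, dedupB_pass1]
    split
    · exact ih si sn u
    · rw [dedupB_pass1_acc]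
      simp only [List.nil_append, List.singleton_append, dedupB_pass2]
      split
      · exact ih _ sn u
      · exact ih _ _ _

-- ===== VERDICT (by name: the statement is the Claim_ definition above) =====
theorem dedup_announcements_py_spec : Claim_equal_dedup_announcements_py := by
  intro anns _
  unfold Spec_dedup_announcements_py dedup_announcements_py dedup_announcements_py_alt
  exact dedup_main anns _ _ _
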